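-- pv_equiv track=rewrite | github.com/zai31/GASCO_DASHBOARD | Modules/maintenance.py | build_event_schedule_for_compressor
-- ===== SOURCE A (Python) =====
-- def build_event_schedule_for_compressor(comp_name, comp_data, total_horizon_hours,
--                                         maintenance_types, cumulative_hours_for_maint, costs):
--     """
--     Build a list of (threshold_hours_from_now, maint_type) events the compressor would hit
--     as it runs forward from its current state, respecting the cyclic sequence.
--     """
--     events = []
--     # hours until next maintenance from current position within the 21k cycle
--     r = comp_data['hrs_until_next_maint']  # 0..3000
--     seq_idx = comp_data['sequence_index']  # index in maintenance_types for the *next* maintenance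
--
--     # First event (if you run at least r hours)
--     if r > 0 and r <= total_horizon_hours:
--         events.append((r, maintenance_types[seq_idx]))
--     # Subsequent events every 3000 hours
--     remaining = total_horizon_hours - r
--     step_idx = (seq_idx + 1) % len(maintenance_types)
--     t = r + 3000
--     while t <= total_horizon_hours:
--         events.append((t, maintenance_types[step_idx]))
--         step_idx = (step_idx + 1) % len(maintenance_types)
--         t += 3000
--     return events  # list of (threshold, type)
-- ===== SOURCE B (Python) =====
-- def build_event_schedule_for_compressor(comp_name, comp_data, total_horizon_hours,
--                                         maintenance_types, cumulative_hours_for_maint, costs):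
--     # Staged construction: compute the event count, build the thresholds as an arithmetic
--     # range and the types by rotating + tiling + slicing the cyclic type list, then zip.
--     r = comp_data['hrs_until_next_maint']
--     seq_idx = comp_data['sequence_index']
--     n = len(maintenance_types)
--     if total_horizon_hours < r:
--         return []
--     start = 0 if r > 0 else 1
--     m = (total_horizon_hours - r) // 3000 + 1 - start   # number of events
--     if m <= 0:
--         return []
--     c = (seq_idx + start) % n
--     rot = maintenance_types[c:] + maintenance_types[:c]  # types in firing order
--     types = (rot * (-(-m // n)))[:m]                     # tile to at least m, cut to m
--     thresholds = range(r + 3000 * start, total_horizon_hours + 1, 3000)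
--     return list(zip(thresholds, types))
-- ===== Notes on version B (the rewrite author's own statement) =====
-- stated objective: alternative
-- what changed: Replaces A's event-by-event while loop (stepping an accumulator threshold and a cyclic index) by a staged bulk construction: count the events, build the thresholds as one arithmetic range, build the types by rotating the type list to firing order, tiling it with list multiplication and slicing to the count, then zip the two lists.
import Mathlib
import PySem

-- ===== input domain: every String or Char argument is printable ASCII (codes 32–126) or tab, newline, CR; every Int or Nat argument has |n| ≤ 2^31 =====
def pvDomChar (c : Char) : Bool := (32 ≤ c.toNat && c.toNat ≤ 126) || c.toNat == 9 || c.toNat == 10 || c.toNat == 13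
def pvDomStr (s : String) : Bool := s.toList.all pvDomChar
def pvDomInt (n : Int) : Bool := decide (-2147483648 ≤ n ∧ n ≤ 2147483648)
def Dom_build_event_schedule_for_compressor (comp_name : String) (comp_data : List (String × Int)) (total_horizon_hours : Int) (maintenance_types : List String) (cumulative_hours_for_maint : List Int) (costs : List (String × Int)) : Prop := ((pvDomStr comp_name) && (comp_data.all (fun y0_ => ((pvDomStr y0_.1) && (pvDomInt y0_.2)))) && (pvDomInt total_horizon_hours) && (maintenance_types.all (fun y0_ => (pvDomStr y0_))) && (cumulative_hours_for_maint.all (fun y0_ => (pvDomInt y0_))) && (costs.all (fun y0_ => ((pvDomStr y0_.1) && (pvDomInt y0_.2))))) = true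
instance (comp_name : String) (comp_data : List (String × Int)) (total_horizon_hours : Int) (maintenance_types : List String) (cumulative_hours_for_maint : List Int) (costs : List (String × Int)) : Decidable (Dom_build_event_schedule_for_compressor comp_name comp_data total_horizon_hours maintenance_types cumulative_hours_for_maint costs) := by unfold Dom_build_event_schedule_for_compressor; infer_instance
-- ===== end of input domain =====

-- B replaces A's event-by-event while loop by a staged bulk construction: count the events,
-- build the thresholds as one arithmetic range and the types by rotate + tile + slice of the
-- cyclic type list, then zip the two lists (objective: alternative, same cost).

-- ===== PORT A =====
-- A's while loop: while t <= H: events.append((t, mt[step_idx])); step_idx = (step_idx+1) % n; t += 3000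
def pyLoopA (mt : List String) (H : Int) (events : List (Int × String)) (step_idx t : Int) : List (Int × String) :=
  if _h : t ≤ H then
    pyLoopA mt H (events ++ [(t, (PySem.List.pyGet? mt step_idx).getD "")])
      (PySem.Int.mod (step_idx + 1) (mt.length : Int)) (t + 3000)
  else events
  termination_by (H + 3000 - t).toNat
  decreasing_by omega

def build_event_schedule_for_compressor (comp_name : String) (comp_data : List (String × Int)) (total_horizon_hours : Int) (maintenance_types : List String) (cumulative_hours_for_maint : List Int) (costs : List (String × Int)) : List (Int × String) :=
  match comp_data.lookup "hrs_until_next_maint", comp_data.lookup "sequence_index" with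
  | some r, some seq_idx =>
    -- Python: empty maintenance_types means the '% len' line raises ZeroDivisionError (excluded by Pre_);
    -- an out-of-range seq_idx on a firing first event raises IndexError ((pyGet? …).getD "" is the none arm, excluded by Pre_)
    if maintenance_types.length = 0 then []
    else
      let events : List (Int × String) :=
        if 0 < r ∧ r ≤ total_horizon_hours then
          [(r, (PySem.List.pyGet? maintenance_types seq_idx).getD "")]
        else []
      pyLoopA maintenance_types total_horizon_hours events
        (PySem.Int.mod (seq_idx + 1) (maintenance_types.length : Int)) (r + 3000)
  | _, _ => []  -- Python: KeyError (excluded by Pre_)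

-- ===== PORT B =====
def build_event_schedule_for_compressor_alt (comp_name : String) (comp_data : List (String × Int)) (total_horizon_hours : Int) (maintenance_types : List String) (cumulative_hours_for_maint : List Int) (costs : List (String × Int)) : List (Int × String) :=
  match comp_data.lookup "hrs_until_next_maint" with
  | none => []  -- Python: KeyError (excluded by Pre_)
  | some r =>
    match comp_data.lookup "sequence_index" with
    | none => []  -- Python: KeyError (excluded by Pre_)
    | some seq_idx =>
      let n : Int := maintenance_types.length
      if total_horizon_hours < r then []
      else
        let start : Int := if 0 < r then 0 else 1
        let m := PySem.Int.floordiv (total_horizon_hours - r) 3000 + 1 - start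
        if m ≤ 0 then []
        else
          -- Python '(seq_idx + start) % n' raises ZeroDivisionError on n = 0 (excluded by Pre_)
          let c := PySem.Int.mod (seq_idx + start) n
          let rot := PySem.List.slice maintenance_types (some c) none ++
                     PySem.List.slice maintenance_types none (some c)
          let types := PySem.List.slice (PySem.List.pyRepeat rot (-(PySem.Int.floordiv (-m) n))) none (some m)
          let thresholds := PySem.List.pyRange (r + 3000 * start) (total_horizon_hours + 1) 3000
          thresholds.zip types
  -- note: 'rot * k' (list repetition) is PySem.List.pyRepeat; 'list(zip(..))' is List.zip

-- ===== PRECONDITION & SPEC =====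
-- Pre_ excludes exactly the inputs where A raises: a missing dict key (KeyError), empty
-- maintenance_types (ZeroDivisionError), and a firing first event with sequence_index outside
-- Python's index range [-n, n) (IndexError). A returns on every input satisfying Pre_.
def Pre_build_event_schedule_for_compressor (comp_name : String) (comp_data : List (String × Int)) (total_horizon_hours : Int) (maintenance_types : List String) (cumulative_hours_for_maint : List Int) (costs : List (String × Int)) : Prop :=
  (comp_data.lookup "hrs_until_next_maint").isSome = true ∧
  (comp_data.lookup "sequence_index").isSome = true ∧
  maintenance_types ≠ [] ∧
  (0 < (comp_data.lookup "hrs_until_next_maint").getD 0 ∧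
      (comp_data.lookup "hrs_until_next_maint").getD 0 ≤ total_horizon_hours →
    -(maintenance_types.length : Int) ≤ (comp_data.lookup "sequence_index").getD 0 ∧
      (comp_data.lookup "sequence_index").getD 0 < (maintenance_types.length : Int))
instance (comp_name : String) (comp_data : List (String × Int)) (total_horizon_hours : Int) (maintenance_types : List String) (cumulative_hours_for_maint : List Int) (costs : List (String × Int)) : Decidable (Pre_build_event_schedule_for_compressor comp_name comp_data total_horizon_hours maintenance_types cumulative_hours_for_maint costs) := by unfold Pre_build_event_schedule_for_compressor; infer_instance

def pvWitness_build_event_schedule_for_compressor : String × (List (String × Int)) × Int × List String × List Int × (List (String × Int)) :=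
  ("c1", [("hrs_until_next_maint", 500), ("sequence_index", 1)], 7000, ["minor", "major"], [500], [("minor", 10)])

def Spec_build_event_schedule_for_compressor (comp_name : String) (comp_data : List (String × Int)) (total_horizon_hours : Int) (maintenance_types : List String) (cumulative_hours_for_maint : List Int) (costs : List (String × Int)) (out : List (Int × String)) : Prop := out = build_event_schedule_for_compressor_alt comp_name comp_data total_horizon_hours maintenance_types cumulative_hours_for_maint costs
instance (comp_name : String) (comp_data : List (String × Int)) (total_horizon_hours : Int) (maintenance_types : List String) (cumulative_hours_for_maint : List Int) (costs : List (String × Int)) (out : List (Int × String)) : Decidable (Spec_build_event_schedule_for_compressor comp_name comp_data total_horizon_hours maintenance_types cumulative_hours_for_maint costs out) := by unfold Spec_build_event_schedule_for_compressor; infer_instance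

-- ===== CLAIM (what is proved, stated in full; the proofs are below) =====
def Claim_equal_build_event_schedule_for_compressor : Prop := ∀ (comp_name : String) (comp_data : List (String × Int)) (total_horizon_hours : Int) (maintenance_types : List String) (cumulative_hours_for_maint : List Int) (costs : List (String × Int)), Dom_build_event_schedule_for_compressor comp_name comp_data total_horizon_hours maintenance_types cumulative_hours_for_maint costs → Pre_build_event_schedule_for_compressor comp_name comp_data total_horizon_hours maintenance_types cumulative_hours_for_maint costs → Spec_build_event_schedule_for_compressor comp_name comp_data total_horizon_hours maintenance_types cumulative_hours_for_maint costs (build_event_schedule_for_compressor comp_name comp_data total_horizon_hours maintenance_types cumulative_hours_for_maint costs)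
-- ===== LEMMAS AND PROOFS =====

lemma pv_mod_step (x n : Int) (hn : 0 < n) :
    PySem.Int.mod (PySem.Int.mod x n + 1) n = PySem.Int.mod (x + 1) n := by
  rw [PySem.Int.mod_eq_emod_of_pos hn, PySem.Int.mod_eq_emod_of_pos hn,
      PySem.Int.mod_eq_emod_of_pos hn]
  conv_rhs => rw [Int.add_emod]
  rw [Int.add_emod (x % n) 1, Int.emod_emod_of_dvd _ dvd_rfl]

-- A's loop unrolled: starting at step j it appends exactly the closed-form tail of events
lemma pv_loopA_eq (mt : List String) (hn : mt ≠ []) (H r s : Int) :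
    ∀ (j : Int), 1 ≤ j → ∀ (events : List (Int × String)),
    pyLoopA mt H events (PySem.Int.mod (s + j) (mt.length : Int)) (r + 3000 * j)
      = events ++ (PySem.List.pyRange j (PySem.Int.floordiv (H - r) 3000 + 1) 1).map
          (fun k => (r + 3000 * k, (PySem.List.pyGet? mt (PySem.Int.mod (s + k) (mt.length : Int))).getD "")) := by
  intro j hj events
  rw [pyLoopA]
  by_cases h : r + 3000 * j ≤ H
  · have hkb : j * 3000 ≤ H - r := by omega
    have hlt : j < PySem.Int.floordiv (H - r) 3000 + 1 := by
      have := (PySem.Int.le_floordiv_iff_mul_le (a := H - r) (b := 3000) (q := j) (by omega)).mpr hkb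
      omega
    rw [dif_pos h, PySem.List.pyRange_one_cons hlt, List.map_cons]
    have hstep : PySem.Int.mod (PySem.Int.mod (s + j) (mt.length : Int) + 1) (mt.length : Int)
        = PySem.Int.mod (s + (j + 1)) (mt.length : Int) := by
      have hn' : (0 : Int) < (mt.length : Int) := by
        have := List.length_pos_iff.mpr hn; exact_mod_cast this
      rw [pv_mod_step _ _ hn']; ring_nf
    have ht : r + 3000 * j + 3000 = r + 3000 * (j + 1) := by ring
    rw [hstep, ht, pv_loopA_eq mt hn H r s (j + 1) (by omega)
        (events ++ [(r + 3000 * j, (PySem.List.pyGet? mt (PySem.Int.mod (s + j) (mt.length : Int))).getD "")])]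
    simp
  · have hge : PySem.Int.floordiv (H - r) 3000 + 1 ≤ j := by
      have := (PySem.Int.floordiv_lt_iff_lt_mul (a := H - r) (b := 3000) (q := j) (by omega)).mpr (by omega)
      omega
    rw [dif_neg h, PySem.List.pyRange_one_eq_nil hge]
    simp
  termination_by j => (H + 3000 - (r + 3000 * j)).toNat
  decreasing_by omega

lemma pv_pyGet?_mod (mt : List String) (hn : mt ≠ []) (s : Int)
    (h1 : -(mt.length : Int) ≤ s) (h2 : s < (mt.length : Int)) :
    PySem.List.pyGet? mt s = PySem.List.pyGet? mt (PySem.Int.mod s (mt.length : Int)) := by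
  have hn' : (0 : Int) < (mt.length : Int) := by
    have := List.length_pos_iff.mpr hn; exact_mod_cast this
  rw [PySem.Int.mod_eq_emod_of_pos hn']
  by_cases hs : 0 ≤ s
  · rw [Int.emod_eq_of_lt hs h2]
  · have hmod : s % (mt.length : Int) = s + (mt.length : Int) := by
      have := Int.add_mul_emod_self_left (a := s) (b := (mt.length : Int)) (c := 1)
      have h0 : (s + (mt.length : Int)) % (mt.length : Int) = s % (mt.length : Int) := by
        simpa using this
      have hlt : s + (mt.length : Int) < (mt.length : Int) := by omega
      have hge : 0 ≤ s + (mt.length : Int) := by omega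
      rw [← h0, Int.emod_eq_of_lt hge hlt]
    have hk0 : 0 < (-s).toNat := by omega
    have hks : (-s).toNat ≤ mt.length := by omega
    have e1 : PySem.List.pyGet? mt s = mt[mt.length - (-s).toNat]? := by
      have hk : s = -(((-s).toNat : Nat) : Int) := by omega
      conv_lhs => rw [hk]
      exact PySem.List.pyGet?_neg_natCast mt ((-s).toNat) hk0 hks
    have hnn : (0 : Int) ≤ s + (mt.length : Int) := by omega
    have e2 : PySem.List.pyGet? mt (s + (mt.length : Int)) = mt[(s + (mt.length : Int)).toNat]? :=
      PySem.List.pyGet?_of_nonneg mt hnn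
    rw [hmod, e1, e2]
    congr 1
    omega

-- rotation indexing: (mt[c:] ++ mt[:c])[j] = mt[(c+j) % n]
lemma pv_rot_getElem (mt : List String) (c : Nat) (hc : c < mt.length) (j : Nat) (hj : j < mt.length) :
    (mt.drop c ++ mt.take c)[j]? = mt[(c + j) % mt.length]? := by
  have hdl : (mt.drop c).length = mt.length - c := by simp
  by_cases h : j < mt.length - c
  · rw [List.getElem?_append_left (by omega : j < (mt.drop c).length), List.getElem?_drop]
    congr 1
    have : c + j < mt.length := by omega
    rw [Nat.mod_eq_of_lt this]
  · rw [List.getElem?_append_right (by omega : (mt.drop c).length ≤ j), hdl]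
    rw [List.getElem?_take_of_lt (by omega : j - (mt.length - c) < c)]
    congr 1
    have : c + j = mt.length + (j - (mt.length - c)) := by omega
    rw [this, Nat.add_mod_left, Nat.mod_eq_of_lt (by omega)]

-- tiling indexing: (rot * k)[i] = rot[i % len rot]
lemma pv_tile_getElem (xs : List String) (hx : xs ≠ []) (k i : Nat) (hi : i < k * xs.length) :
    (List.replicate k xs).flatten[i]? = xs[i % xs.length]? := by
  induction k generalizing i with
  | zero => omega
  | succ k ih =>
    rw [List.replicate_succ, List.flatten_cons]
    by_cases h : i < xs.length
    · rw [List.getElem?_append_left h, Nat.mod_eq_of_lt h]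
    · rw [List.getElem?_append_right (by omega)]
      have h2 : i - xs.length < k * xs.length := by
        have h3 : (k + 1) * xs.length = k * xs.length + xs.length := by ring
        omega
      rw [ih (i - xs.length) h2]
      congr 1
      have hxl : 0 < xs.length := List.length_pos_iff.mpr hx
      conv_rhs => rw [show i = (i - xs.length) + xs.length by omega]
      rw [Nat.add_mod_right]

lemma pv_len_tile (xs : List String) (k : Nat) :
    (List.replicate k xs).flatten.length = k * xs.length := by
  simp [List.length_flatten, List.map_replicate, List.sum_replicate, smul_eq_mul]

-- ===== VERDICT helper: B's staged build equals the closed-form event list =====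
lemma pv_alt_closed (mt : List String) (hmt : mt ≠ []) (H r s : Int) (hH : ¬ H < r)
    (start : Int) (hstart : start = if 0 < r then 0 else 1)
    (hm : ¬ PySem.Int.floordiv (H - r) 3000 + 1 - start ≤ 0) :
    (PySem.List.pyRange (r + 3000 * start) (H + 1) 3000).zip
      (PySem.List.slice
        (PySem.List.pyRepeat
          (PySem.List.slice mt (some (PySem.Int.mod (s + start) (mt.length : Int))) none ++
           PySem.List.slice mt none (some (PySem.Int.mod (s + start) (mt.length : Int))))
          (-(PySem.Int.floordiv (-(PySem.Int.floordiv (H - r) 3000 + 1 - start)) (mt.length : Int))))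
        none (some (PySem.Int.floordiv (H - r) 3000 + 1 - start)))
      = (PySem.List.pyRange start (PySem.Int.floordiv (H - r) 3000 + 1) 1).map
          (fun k => (r + 3000 * k, (PySem.List.pyGet? mt (PySem.Int.mod (s + k) (mt.length : Int))).getD "")) := by
  have hn' : (0 : Int) < (mt.length : Int) := by
    have := List.length_pos_iff.mpr hmt; exact_mod_cast this
  set n : Int := (mt.length : Int) with hn
  set kmax : Int := PySem.Int.floordiv (H - r) 3000 with hkmax
  set m : Int := kmax + 1 - start with hmdef
  have hkmax0 : 0 ≤ kmax := by
    rw [hkmax]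
    exact (PySem.Int.le_floordiv_iff_mul_le (by omega)).mpr (by omega)
  have hkb : kmax * 3000 ≤ H - r :=
    (PySem.Int.le_floordiv_iff_mul_le (by omega : (0:Int) < 3000)).mp (le_of_eq hkmax)
  have hstart01 : start = 0 ∨ start = 1 := by rw [hstart]; split <;> simp
  have hsk : start ≤ kmax := by omega
  have hmpos : 0 < m := by omega
  -- the rotation offset as a Nat
  set c : Int := PySem.Int.mod (s + start) n with hc
  have hc0 : 0 ≤ c := PySem.Int.mod_nonneg _ hn'
  have hcn : c < n := PySem.Int.mod_lt _ hn'
  set c' : Nat := c.toNat with hc'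
  have hc'lt : c' < mt.length := by omega
  -- repetition count
  set reps : Int := -(PySem.Int.floordiv (-m) n) with hreps
  have hrepsmul : m ≤ reps * n := by
    rw [hreps, PySem.Int.floordiv_eq_ediv_of_pos hn']
    have heq := Int.ediv_add_emod (-m) n
    have hpos := Int.emod_nonneg (-m) (by omega : n ≠ 0)
    have h1 : n * ((-m) / n) ≤ -m := by linarith
    have h2 : -((-m) / n) * n = -(n * ((-m) / n)) := by ring
    rw [h2]; linarith
  have hreps0 : 0 ≤ reps := by nlinarith
  -- rewrite slices to drop/take
  rw [PySem.List.slice_from mt hc0, PySem.List.slice_to mt hc0]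
  set rot : List String := mt.drop c' ++ mt.take c' with hrot
  have hrotlen : rot.length = mt.length := by simp [hrot]; omega
  have hrotne : rot ≠ [] := by
    intro h; rw [h] at hrotlen; simp at hrotlen; omega
  -- lengths of the tiled list
  have htilelen : (PySem.List.pyRepeat rot reps).length = reps.toNat * mt.length := by
    show (List.replicate reps.toNat rot).flatten.length = _
    rw [pv_len_tile, hrotlen]
  have hmn : m.toNat ≤ reps.toNat * mt.length := by
    have : (m.toNat : Int) ≤ (reps.toNat : Int) * (mt.length : Int) := by
      push_cast; rw [Int.toNat_of_nonneg (by omega), Int.toNat_of_nonneg hreps0]; exact hrepsmul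
    exact_mod_cast this
  -- thresholds as a map over the k-range
  have hthr : PySem.List.pyRange (r + 3000 * start) (H + 1) 3000
      = (PySem.List.pyRange start (kmax + 1) 1).map (fun k => r + 3000 * k) := by
    rw [PySem.List.pyRange_of_pos _ _ (by omega), PySem.List.pyRange_one, List.map_map]
    have hab : r + 3000 * start < H + 1 := by nlinarith
    rw [if_pos hab]
    have hcount : ((H + 1 - (r + 3000 * start) + 3000 - 1) / 3000) = m := by
      have : H + 1 - (r + 3000 * start) + 3000 - 1 = (H - r) + (1 - start) * 3000 := by ring
      rw [this, Int.add_mul_ediv_right _ _ (by omega)]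
      rw [hmdef, hkmax, PySem.Int.floordiv_eq_ediv_of_pos (by omega : (0:Int) < 3000)]
      ring
    rw [hcount]
    have hlen : (kmax + 1 - start).toNat = m.toNat := by omega
    rw [hlen]
    apply List.map_congr_left
    intro a _
    simp only [Function.comp]
    ring
  rw [hthr]
  -- types as a map over the k-range (elementwise)
  have htypes : PySem.List.slice (PySem.List.pyRepeat rot reps) none (some m)
      = (PySem.List.pyRange start (kmax + 1) 1).map
          (fun k => (PySem.List.pyGet? mt (PySem.Int.mod (s + k) n)).getD "") := by
    rw [PySem.List.slice_to _ (by omega : (0:Int) ≤ m)]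
    apply List.ext_getElem?
    intro i
    by_cases hi : i < m.toNat
    · rw [List.getElem?_take_of_lt hi]
      have htile : (PySem.List.pyRepeat rot reps)[i]? = rot[i % rot.length]? :=
        pv_tile_getElem rot hrotne reps.toNat i (by rw [hrotlen]; omega)
      rw [htile, hrotlen, pv_rot_getElem mt c' hc'lt (i % mt.length) (Nat.mod_lt _ (by omega))]
      -- RHS
      rw [List.getElem?_map, PySem.List.getElem?_pyRange_one]
      rw [if_pos (by omega : i < (kmax + 1 - start).toNat)]
      simp only [Option.map_some]
      -- index arithmetic: (c' + i % len) % len = (c' + i) % len = toNat of (s+start+i) mod n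
      have hidx1 : (c' + i % mt.length) % mt.length = (c' + i) % mt.length := by
        conv_lhs => rw [Nat.add_mod, Nat.mod_mod_of_dvd i dvd_rfl, ← Nat.add_mod]
      have hc2 : ((c' : Nat) : Int) = (s + start) % n := by
        rw [hc', Int.toNat_of_nonneg hc0, hc, PySem.Int.mod_eq_emod_of_pos hn']
      have hmodeq : PySem.Int.mod (s + (start + (i : Int))) n = (((c' + i) % mt.length : Nat) : Int) := by
        rw [PySem.Int.mod_eq_emod_of_pos hn']
        have h1 : s + (start + (i : Int)) = (s + start) + (i : Int) := by ring
        rw [h1, ← Int.emod_add_emod, ← hc2]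
        rw [hn]
        push_cast
        ring
      rw [hmodeq, PySem.List.pyGet?_natCast, hidx1]
      have hlt2 : (c' + i) % mt.length < mt.length := Nat.mod_lt _ (by omega)
      rw [List.getElem?_eq_getElem hlt2]
      simp
    · rw [List.getElem?_eq_none, List.getElem?_eq_none]
      · simp only [List.length_map, PySem.List.length_pyRange_one]; omega
      · simp only [List.length_take]; omega
  rw [htypes, List.zip_map']

-- ===== VERDICT (by name: the statement is the Claim_ definition above) =====
theorem build_event_schedule_for_compressor_spec : Claim_equal_build_event_schedule_for_compressor := by
  intro comp_name comp_data H mt cum costs _ hpre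
  obtain ⟨h1, h2, hmt, hidx⟩ := hpre
  unfold Spec_build_event_schedule_for_compressor
  unfold build_event_schedule_for_compressor build_event_schedule_for_compressor_alt
  obtain ⟨r, hr⟩ := Option.isSome_iff_exists.mp h1
  obtain ⟨s, hs⟩ := Option.isSome_iff_exists.mp h2
  rw [hr, hs]
  dsimp only
  rw [hr, hs] at hidx
  simp only [Option.getD_some] at hidx
  have hn0 : ¬ mt.length = 0 := by simpa [List.length_eq_zero_iff] using hmt
  have hn' : (0 : Int) < (mt.length : Int) := by
    have := List.length_pos_iff.mpr hmt; exact_mod_cast this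
  rw [if_neg hn0]
  set kmax : Int := PySem.Int.floordiv (H - r) 3000 with hkmax
  by_cases hH : H < r
  · -- no events at all
    have hfirst : ¬ (0 < r ∧ r ≤ H) := by omega
    rw [if_pos hH, if_neg hfirst]
    have h0 : r + 3000 = r + 3000 * 1 := by ring
    rw [h0, pv_loopA_eq mt hmt H r s 1 le_rfl []]
    have hge : kmax + 1 ≤ 1 := by
      have := (PySem.Int.floordiv_lt_iff_lt_mul (a := H - r) (b := 3000) (q := 1) (by omega)).mpr (by omega)
      omega
    rw [PySem.List.pyRange_one_eq_nil hge]
    simp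
  · rw [if_neg hH]
    have hkmax0 : 0 ≤ kmax := by
      rw [hkmax]; exact (PySem.Int.le_floordiv_iff_mul_le (by omega)).mpr (by omega)
    by_cases hrpos : 0 < r
    · -- first event fires; start = 0, m = kmax + 1 > 0
      have hfirst : 0 < r ∧ r ≤ H := ⟨hrpos, by omega⟩
      obtain ⟨hb1, hb2⟩ := hidx hfirst
      rw [if_pos hfirst]
      rw [if_pos hrpos]
      rw [if_neg (by omega : ¬ kmax + 1 - 0 ≤ 0)]
      have hB := pv_alt_closed mt hmt H r s hH 0 (by rw [if_pos hrpos]) (by omega)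
      rw [← hkmax] at hB
      simp only [sub_zero] at hB ⊢
      rw [hB]
      have h0 : r + 3000 = r + 3000 * 1 := by ring
      rw [h0, pv_loopA_eq mt hmt H r s 1 le_rfl _]
      have hcons : (0 : Int) < kmax + 1 := by omega
      rw [PySem.List.pyRange_one_cons hcons, List.map_cons]
      have hhead : PySem.Int.mod (s + 0) (mt.length : Int) = PySem.Int.mod s (mt.length : Int) := by ring_nf
      rw [hhead, ← pv_pyGet?_mod mt hmt s hb1 hb2]
      simp
      have hke : kmax = (H - r) / 3000 := by
        rw [hkmax]; exact PySem.Int.floordiv_eq_ediv_of_pos (by omega)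
      rw [hke]
    · -- r ≤ 0: no first event; start = 1
      have hfirst : ¬ (0 < r ∧ r ≤ H) := by omega
      rw [if_neg hfirst, if_neg hrpos]
      by_cases hm : kmax + 1 - 1 ≤ 0
      · rw [if_pos hm]
        have h0 : r + 3000 = r + 3000 * 1 := by ring
        rw [h0, pv_loopA_eq mt hmt H r s 1 le_rfl []]
        rw [PySem.List.pyRange_one_eq_nil (by omega)]
        simp
      · rw [if_neg hm]
        have hB := pv_alt_closed mt hmt H r s hH 1 (by rw [if_neg hrpos]) (by exact hm)
        rw [← hkmax] at hB
        rw [hB]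
        have h0 : r + 3000 = r + 3000 * 1 := by ring
        rw [h0, pv_loopA_eq mt hmt H r s 1 le_rfl []]
        simp
        have hke : kmax = (H - r) / 3000 := by
          rw [hkmax]; exact PySem.Int.floordiv_eq_ediv_of_pos (by omega)
        rw [hke]
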